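-- pv_equiv track=rewrite | github.com/SINHOLEE/Algorithm | python/SSAFY_정규수업/9월/9월10일/암호2.py | isrightarr
-- ===== SOURCE A (Python) =====
-- def isrightarr(current_arr, k):
--     patturn = [
--         '000' * k + '11' * k + '0' * k +'1' * k,  #0
--         '00' * k + '11' * k + '00' * k + '1' * k,  #1
--         '00' * k + '1' * k + '00' * k + '11' * k,  #2
--         '0' * k + '1111' * k + '0' * k + '1' * k,  #3
--         '0' * k + '1' * k + '000' * k + '11' * k,  #4
--         '0' * k + '11' * k + '000' * k + '1' * k,  #5
--         '0' * k + '1' * k + '0' * k + '1111' * k,  #6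
--         '0' * k + '111' * k + '0' * k + '11' * k,  #7
--         '0' * k + '11' * k + '0' * k + '111' * k,  #8
--         '000' * k + '1' * k + '0' * k + '11' * k,  #9
--     ]
--
--     for my_index in range(0, len(current_arr),7 * k):
--         if current_arr[my_index:my_index+(7*k)] in patturn:
--            pass
--         else:
--             return False
--     return True
-- ===== SOURCE B (Python) =====
-- # Run-length-encoding judge: instead of building ten pattern strings of length
-- # 7k per call and comparing each chunk against all of them, encode each 7k
-- # chunk into (char, run-length) pairs once and accept exactly the ten allowed
-- # run-length profiles scaled by k.
--
-- _PROFILES = {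
--     (3, 2, 1, 1), (2, 2, 2, 1), (2, 1, 2, 2), (1, 4, 1, 1), (1, 1, 3, 2),
--     (1, 2, 3, 1), (1, 1, 1, 4), (1, 3, 1, 2), (1, 2, 1, 3), (3, 1, 1, 2),
-- }
--
--
-- def _rle(s):
--     runs = []
--     for ch in s:
--         if runs and runs[-1][0] == ch:
--             runs[-1] = (ch, runs[-1][1] + 1)
--         else:
--             runs.append((ch, 1))
--     return runs
--
--
-- def _chunk_ok(chunk, k):
--     runs = _rle(chunk)
--     if len(runs) != 4:
--         return False
--     (c0, a), (c1, b), (c2, c), (c3, d) = runs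
--     if (c0, c1, c2, c3) != ('0', '1', '0', '1'):
--         return False
--     if a % k or b % k or c % k or d % k:
--         return False
--     return (a // k, b // k, c // k, d // k) in _PROFILES
--
--
-- def isrightarr(current_arr, k):
--     for i in range(0, len(current_arr), 7 * k):
--         if not _chunk_ok(current_arr[i:i + 7 * k], k):
--             return False
--     return True
-- ===== Notes on version B (the rewrite author's own statement) =====
-- stated objective: alternative
-- what changed: A rebuilds ten length-7k pattern strings per call and compares every chunk against each of them; B never builds pattern strings: it run-length-encodes each chunk into (char,length) runs and accepts exactly the ten allowed run profiles scaled by k.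
import Mathlib
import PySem

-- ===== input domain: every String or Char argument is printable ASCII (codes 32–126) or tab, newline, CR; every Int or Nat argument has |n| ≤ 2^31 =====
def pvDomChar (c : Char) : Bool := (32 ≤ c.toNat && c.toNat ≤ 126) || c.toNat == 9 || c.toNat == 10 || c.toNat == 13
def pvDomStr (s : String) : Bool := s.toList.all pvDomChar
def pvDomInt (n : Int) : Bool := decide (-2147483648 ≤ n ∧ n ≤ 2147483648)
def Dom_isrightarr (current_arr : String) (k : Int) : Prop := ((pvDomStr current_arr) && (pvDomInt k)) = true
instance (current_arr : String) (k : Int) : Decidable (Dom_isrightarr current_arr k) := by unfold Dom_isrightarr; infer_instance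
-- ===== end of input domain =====

-- B replaces A's ten per-call pattern strings by a single run-length encoding
-- of each chunk checked against ten allowed run profiles (objective: alternative
-- algorithm; no pattern strings are ever built).

-- ===== PORT A =====
-- the list 'patturn' of A ('000' * k + '11' * k + … , ported on code-point lists)
def pvPat (k : Int) : List (List Char) :=
  [ PySem.List.pyRepeat ['0','0','0'] k ++ PySem.List.pyRepeat ['1','1'] k ++ PySem.List.pyRepeat ['0'] k ++ PySem.List.pyRepeat ['1'] k,
    PySem.List.pyRepeat ['0','0'] k ++ PySem.List.pyRepeat ['1','1'] k ++ PySem.List.pyRepeat ['0','0'] k ++ PySem.List.pyRepeat ['1'] k,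
    PySem.List.pyRepeat ['0','0'] k ++ PySem.List.pyRepeat ['1'] k ++ PySem.List.pyRepeat ['0','0'] k ++ PySem.List.pyRepeat ['1','1'] k,
    PySem.List.pyRepeat ['0'] k ++ PySem.List.pyRepeat ['1','1','1','1'] k ++ PySem.List.pyRepeat ['0'] k ++ PySem.List.pyRepeat ['1'] k,
    PySem.List.pyRepeat ['0'] k ++ PySem.List.pyRepeat ['1'] k ++ PySem.List.pyRepeat ['0','0','0'] k ++ PySem.List.pyRepeat ['1','1'] k,
    PySem.List.pyRepeat ['0'] k ++ PySem.List.pyRepeat ['1','1'] k ++ PySem.List.pyRepeat ['0','0','0'] k ++ PySem.List.pyRepeat ['1'] k,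
    PySem.List.pyRepeat ['0'] k ++ PySem.List.pyRepeat ['1'] k ++ PySem.List.pyRepeat ['0'] k ++ PySem.List.pyRepeat ['1','1','1','1'] k,
    PySem.List.pyRepeat ['0'] k ++ PySem.List.pyRepeat ['1','1','1'] k ++ PySem.List.pyRepeat ['0'] k ++ PySem.List.pyRepeat ['1','1'] k,
    PySem.List.pyRepeat ['0'] k ++ PySem.List.pyRepeat ['1','1'] k ++ PySem.List.pyRepeat ['0'] k ++ PySem.List.pyRepeat ['1','1','1'] k,
    PySem.List.pyRepeat ['0','0','0'] k ++ PySem.List.pyRepeat ['1'] k ++ PySem.List.pyRepeat ['0'] k ++ PySem.List.pyRepeat ['1','1'] k ]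

-- A's for-loop: first chunk not in 'patturn' returns False, else True
def pvGoA (s : List Char) (pat : List (List Char)) (k : Int) : List Int → Bool
  | [] => true
  | i :: rest =>
      if PySem.List.slice s (some i) (some (i + 7 * k)) ∈ pat then pvGoA s pat k rest else false

def isrightarr (current_arr : String) (k : Int) : Bool :=
  pvGoA current_arr.toList (pvPat k) k
    (PySem.List.pyRange 0 (PySem.Chars.len current_arr.toList) (7 * k))

-- ===== PORT B =====
-- _rle of Source B: runs[-1] updated in place or a fresh (ch, 1) appended
def pvRleStep (runs : List (Char × Nat)) (ch : Char) : List (Char × Nat) :=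
  match runs.getLast? with
  | some (c, n) => if c == ch then runs.dropLast ++ [(ch, n + 1)] else runs ++ [(ch, 1)]
  | none => [(ch, 1)]

def pvRle (s : List Char) : List (Char × Nat) := s.foldl pvRleStep []

-- _PROFILES of Source B
def pvProfiles : List (Int × Int × Int × Int) :=
  [(3,2,1,1),(2,2,2,1),(2,1,2,2),(1,4,1,1),(1,1,3,2),(1,2,3,1),(1,1,1,4),(1,3,1,2),(1,2,1,3),(3,1,1,2)]

-- _chunk_ok of Source B
def pvChunkOk (chunk : List Char) (k : Int) : Bool :=
  match pvRle chunk with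
  | [(c0, a), (c1, b), (c2, c), (c3, d)] =>
      if !((c0, c1, c2, c3) == ('0', '1', '0', '1')) then false
      else if PySem.Int.mod (a : Int) k != 0 || PySem.Int.mod (b : Int) k != 0 ||
              PySem.Int.mod (c : Int) k != 0 || PySem.Int.mod (d : Int) k != 0 then false
      else decide ((PySem.Int.floordiv (a : Int) k, PySem.Int.floordiv (b : Int) k,
                    PySem.Int.floordiv (c : Int) k, PySem.Int.floordiv (d : Int) k) ∈ pvProfiles)
  | _ => false

def pvGoB (s : List Char) (k : Int) : List Int → Bool
  | [] => true
  | i :: rest =>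
      if pvChunkOk (PySem.List.slice s (some i) (some (i + 7 * k))) k then pvGoB s k rest else false

def isrightarr_alt (current_arr : String) (k : Int) : Bool :=
  pvGoB current_arr.toList k
    (PySem.List.pyRange 0 (PySem.Chars.len current_arr.toList) (7 * k))

-- ===== PRECONDITION & SPEC =====
-- Pre_ excludes only k = 0, where Python's range(0, len, 0) raises ValueError (in A and in B alike).
def Pre_isrightarr (current_arr : String) (k : Int) : Prop := k ≠ 0
instance (current_arr : String) (k : Int) : Decidable (Pre_isrightarr current_arr k) := by
  unfold Pre_isrightarr; infer_instance

def pvWitness_isrightarr : String × Int := ("0010111", 1)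

def Spec_isrightarr (current_arr : String) (k : Int) (out : Bool) : Prop := out = isrightarr_alt current_arr k
instance (current_arr : String) (k : Int) (out : Bool) : Decidable (Spec_isrightarr current_arr k out) := by
  unfold Spec_isrightarr; infer_instance

-- ===== CLAIM (what is proved, stated in full; the proofs are below) =====
def Claim_equal_isrightarr : Prop := ∀ (current_arr : String) (k : Int), Dom_isrightarr current_arr k → Pre_isrightarr current_arr k → Spec_isrightarr current_arr k (isrightarr current_arr k)

-- ===== LEMMAS AND PROOFS =====

-- proof-side vocabulary
def pvCanon (a b c d : Nat) : List Char :=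
  List.replicate a '0' ++ List.replicate b '1' ++ List.replicate c '0' ++ List.replicate d '1'

def pvRunsOf (a b c d : Nat) : List (Char × Nat) := [('0', a), ('1', b), ('0', c), ('1', d)]

def pvProfilesNat : List (Nat × Nat × Nat × Nat) :=
  [(3,2,1,1),(2,2,2,1),(2,1,2,2),(1,4,1,1),(1,1,3,2),(1,2,3,1),(1,1,1,4),(1,3,1,2),(1,2,1,3),(3,1,1,2)]

def pvFlat (rs : List (Char × Nat)) : List Char := rs.flatMap fun p => List.replicate p.2 p.1

theorem pvRleStep_flat (acc : List (Char × Nat)) (ch : Char) :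
    pvFlat (pvRleStep acc ch) = pvFlat acc ++ [ch] := by
  rcases h : acc.getLast? with _ | ⟨c, n⟩
  · rw [List.getLast?_eq_none_iff.1 h]
    simp [pvRleStep, pvFlat]
  · obtain ⟨l', rfl⟩ := List.getLast?_eq_some_iff.1 h
    by_cases hc : c = ch
    · subst hc
      simp [pvRleStep, pvFlat, List.replicate_succ' (n := n)]
    · simp [pvRleStep, pvFlat, hc]

theorem pvRle_foldl_flat (s : List Char) (acc : List (Char × Nat)) :
    pvFlat (s.foldl pvRleStep acc) = pvFlat acc ++ s := by
  induction s generalizing acc with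
  | nil => simp
  | cons ch s ih => rw [List.foldl_cons, ih, pvRleStep_flat]; simp

theorem pvRle_inverse (s : List Char) : pvFlat (pvRle s) = s := by
  rw [pvRle, pvRle_foldl_flat]; rfl

theorem pvRun_extend (m : Nat) (acc : List (Char × Nat)) (c : Char) (n : Nat) :
    (List.replicate m c).foldl pvRleStep (acc ++ [(c, n)]) = acc ++ [(c, n + m)] := by
  induction m generalizing n with
  | zero => simp
  | succ m ih =>
      rw [List.replicate_succ, List.foldl_cons]
      have hstep : pvRleStep (acc ++ [(c, n)]) c = acc ++ [(c, n + 1)] := by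
        simp [pvRleStep]
      rw [hstep, ih]
      ring_nf

theorem pvRun_block (m : Nat) (hm : m ≠ 0) (acc : List (Char × Nat)) (c : Char)
    (h : acc.getLast?.map Prod.fst ≠ some c) (rest : List Char) :
    (List.replicate m c ++ rest).foldl pvRleStep acc = rest.foldl pvRleStep (acc ++ [(c, m)]) := by
  obtain ⟨m', rfl⟩ : ∃ m', m = m' + 1 := ⟨m - 1, by omega⟩
  rw [List.replicate_succ, List.cons_append, List.foldl_cons, List.foldl_append]
  have hstep : pvRleStep acc c = acc ++ [(c, 1)] := by
    rcases hl : acc.getLast? with _ | ⟨c', n'⟩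
    · rw [List.getLast?_eq_none_iff.1 hl]; simp [pvRleStep]
    · have : c' ≠ c := by intro hcc; exact h (by rw [hl, hcc]; rfl)
      obtain ⟨l', rfl⟩ := List.getLast?_eq_some_iff.1 hl
      simp [pvRleStep, this]
  rw [hstep, pvRun_extend, Nat.add_comm 1 m']

theorem pvRle_canon (a b c d : Nat) (ha : a ≠ 0) (hb : b ≠ 0) (hc : c ≠ 0) (hd : d ≠ 0) :
    pvRle (pvCanon a b c d) = pvRunsOf a b c d := by
  have h01 : ('0' : Char) ≠ '1' := by decide
  rw [pvRle, pvCanon]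
  simp only [List.append_assoc]
  rw [pvRun_block a ha [] '0' (by simp)]
  rw [pvRun_block b hb _ '1' (by simp [h01])]
  rw [pvRun_block c hc _ '0' (by simp [h01.symm])]
  rw [show List.replicate d '1' = List.replicate d '1' ++ ([] : List Char) by simp]
  rw [pvRun_block d hd _ '1' (by simp [h01])]
  simp [pvRunsOf]

def pvGood (cs : List Char) (K : Nat) : Prop :=
  ∃ t ∈ pvProfilesNat, cs = pvCanon (t.1 * K) (t.2.1 * K) (t.2.2.1 * K) (t.2.2.2 * K)

theorem pvRep_mul (j K : Nat) (c : Char) :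
    PySem.List.pyRepeat (List.replicate j c) (K : Int) = List.replicate (j * K) c := by
  simp [PySem.List.pyRepeat, Nat.mul_comm]

theorem pvRepL (j K : Nat) (c : Char) (l : List Char) (hl : l = List.replicate j c) :
    PySem.List.pyRepeat l (K : Int) = List.replicate (j * K) c := by
  rw [hl, pvRep_mul]

theorem pvPat_eq (K : Nat) :
    pvPat (K : Int) = pvProfilesNat.map fun t => pvCanon (t.1 * K) (t.2.1 * K) (t.2.2.1 * K) (t.2.2.2 * K) := by
  rw [pvPat,
      pvRepL 1 K '0' ['0'] rfl, pvRepL 1 K '1' ['1'] rfl,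
      pvRepL 2 K '0' ['0','0'] rfl, pvRepL 2 K '1' ['1','1'] rfl,
      pvRepL 3 K '0' ['0','0','0'] rfl, pvRepL 3 K '1' ['1','1','1'] rfl,
      pvRepL 4 K '1' ['1','1','1','1'] rfl]
  simp [pvProfilesNat, pvCanon]

theorem pvMemPat_iff (K : Nat) (cs : List Char) : cs ∈ pvPat (K : Int) ↔ pvGood cs K := by
  rw [pvPat_eq, pvGood]
  simp [List.mem_map, eq_comm]

theorem pvMod_zero (A K : Nat) : PySem.Int.mod ((A : Int) * (K : Int)) (K : Int) = 0 :=
  (PySem.Int.mod_eq_zero_iff_dvd _ _).2 (⟨A, by ring⟩)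

theorem pvFd (a K : Nat) (hK : K ≠ 0) :
    PySem.Int.floordiv ((a : Int) * (K : Int)) (K : Int) = (a : Int) := by
  have hKpos : (0 : Int) < (K : Int) := by exact_mod_cast Nat.pos_of_ne_zero hK
  rw [PySem.Int.floordiv_eq_iff_of_pos hKpos]
  constructor
  · nlinarith [Nat.pos_of_ne_zero hK]
  · nlinarith [hKpos]

theorem pvInv (A K q : Nat) (hK : K ≠ 0)
    (hmod : PySem.Int.mod (A : Int) (K : Int) = 0)
    (hdiv : A / K = q) : A = q * K := by
  have hdvd : (K : Int) ∣ (A : Int) := (PySem.Int.mod_eq_zero_iff_dvd _ _).1 hmod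
  have hKA : K ∣ A := by exact_mod_cast hdvd
  rw [← hdiv, Nat.div_mul_cancel hKA]

theorem pvFlat_runsOf (a b c d : Nat) : pvFlat (pvRunsOf a b c d) = pvCanon a b c d := by
  simp [pvFlat, pvRunsOf, pvCanon]

theorem pvGood_of (K A B C D a b c d : Nat) (hK : K ≠ 0) (cs : List Char)
    (hr : pvRle cs = [('0', A), ('1', B), ('0', C), ('1', D)])
    (hm1 : PySem.Int.mod (A : Int) (K : Int) = 0) (hm2 : PySem.Int.mod (B : Int) (K : Int) = 0)
    (hm3 : PySem.Int.mod (C : Int) (K : Int) = 0) (hm4 : PySem.Int.mod (D : Int) (K : Int) = 0)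
    (h1 : A / K = a) (h2 : B / K = b) (h3 : C / K = c) (h4 : D / K = d)
    (ht : (a, b, c, d) ∈ pvProfilesNat) : pvGood cs K := by
  refine ⟨(a, b, c, d), ht, ?_⟩
  rw [← pvRle_inverse cs, hr,
      pvInv A K a hK hm1 h1, pvInv B K b hK hm2 h2, pvInv C K c hK hm3 h3, pvInv D K d hK hm4 h4]
  exact pvFlat_runsOf _ _ _ _

theorem pvChunkOk_canon (K a b c d : Nat) (hK : K ≠ 0) (ha : a ≠ 0) (hb : b ≠ 0) (hc : c ≠ 0) (hd : d ≠ 0)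
    (ht : ((a : Int), (b : Int), (c : Int), (d : Int)) ∈ pvProfiles) :
    pvChunkOk (pvCanon (a * K) (b * K) (c * K) (d * K)) (K : Int) = true := by
  have hr := pvRle_canon (a * K) (b * K) (c * K) (d * K)
    (Nat.mul_ne_zero ha hK) (Nat.mul_ne_zero hb hK) (Nat.mul_ne_zero hc hK) (Nat.mul_ne_zero hd hK)
  simp [pvChunkOk, hr, pvRunsOf, pvMod_zero, pvFd a K hK, pvFd b K hK, pvFd c K hK, pvFd d K hK, ht]

theorem pvChunkOk_iff (K : Nat) (hK : K ≠ 0) (cs : List Char) :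
    pvChunkOk cs (K : Int) = true ↔ pvGood cs K := by
  constructor
  · intro h
    rcases hr : pvRle cs with _ | ⟨⟨c0, A⟩, _ | ⟨⟨c1, B⟩, _ | ⟨⟨c2, C⟩, _ | ⟨⟨c3, D⟩, _ | ⟨x, xs⟩⟩⟩⟩⟩
    · simp [pvChunkOk, hr] at h
    · simp [pvChunkOk, hr] at h
    · simp [pvChunkOk, hr] at h
    · simp [pvChunkOk, hr] at h
    · simp only [pvChunkOk, hr] at h
      split_ifs at h with h1 h2
      simp at h1
      simp only [Bool.or_eq_true, bne_iff_ne, ne_eq, not_or, not_not] at h2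
      obtain ⟨rfl, rfl, rfl, rfl⟩ := h1
      obtain ⟨⟨⟨hm1, hm2⟩, hm3⟩, hm4⟩ := h2
      rw [decide_eq_true_iff] at h
      simp [pvProfiles] at h
      rcases h with ⟨e1, e2, e3, e4⟩|⟨e1, e2, e3, e4⟩|⟨e1, e2, e3, e4⟩|⟨e1, e2, e3, e4⟩|⟨e1, e2, e3, e4⟩|⟨e1, e2, e3, e4⟩|⟨e1, e2, e3, e4⟩|⟨e1, e2, e3, e4⟩|⟨e1, e2, e3, e4⟩|⟨e1, e2, e3, e4⟩
      · exact pvGood_of K A B C D 3 2 1 1 hK cs hr hm1 hm2 hm3 hm4 (by exact_mod_cast e1) (by exact_mod_cast e2) (by exact_mod_cast e3) (by exact_mod_cast e4) (by simp [pvProfilesNat])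
      · exact pvGood_of K A B C D 2 2 2 1 hK cs hr hm1 hm2 hm3 hm4 (by exact_mod_cast e1) (by exact_mod_cast e2) (by exact_mod_cast e3) (by exact_mod_cast e4) (by simp [pvProfilesNat])
      · exact pvGood_of K A B C D 2 1 2 2 hK cs hr hm1 hm2 hm3 hm4 (by exact_mod_cast e1) (by exact_mod_cast e2) (by exact_mod_cast e3) (by exact_mod_cast e4) (by simp [pvProfilesNat])
      · exact pvGood_of K A B C D 1 4 1 1 hK cs hr hm1 hm2 hm3 hm4 (by exact_mod_cast e1) (by exact_mod_cast e2) (by exact_mod_cast e3) (by exact_mod_cast e4) (by simp [pvProfilesNat])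
      · exact pvGood_of K A B C D 1 1 3 2 hK cs hr hm1 hm2 hm3 hm4 (by exact_mod_cast e1) (by exact_mod_cast e2) (by exact_mod_cast e3) (by exact_mod_cast e4) (by simp [pvProfilesNat])
      · exact pvGood_of K A B C D 1 2 3 1 hK cs hr hm1 hm2 hm3 hm4 (by exact_mod_cast e1) (by exact_mod_cast e2) (by exact_mod_cast e3) (by exact_mod_cast e4) (by simp [pvProfilesNat])
      · exact pvGood_of K A B C D 1 1 1 4 hK cs hr hm1 hm2 hm3 hm4 (by exact_mod_cast e1) (by exact_mod_cast e2) (by exact_mod_cast e3) (by exact_mod_cast e4) (by simp [pvProfilesNat])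
      · exact pvGood_of K A B C D 1 3 1 2 hK cs hr hm1 hm2 hm3 hm4 (by exact_mod_cast e1) (by exact_mod_cast e2) (by exact_mod_cast e3) (by exact_mod_cast e4) (by simp [pvProfilesNat])
      · exact pvGood_of K A B C D 1 2 1 3 hK cs hr hm1 hm2 hm3 hm4 (by exact_mod_cast e1) (by exact_mod_cast e2) (by exact_mod_cast e3) (by exact_mod_cast e4) (by simp [pvProfilesNat])
      · exact pvGood_of K A B C D 3 1 1 2 hK cs hr hm1 hm2 hm3 hm4 (by exact_mod_cast e1) (by exact_mod_cast e2) (by exact_mod_cast e3) (by exact_mod_cast e4) (by simp [pvProfilesNat])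
    · simp [pvChunkOk, hr] at h
  · rintro ⟨t, ht, rfl⟩
    fin_cases ht <;>
      exact pvChunkOk_canon K _ _ _ _ hK (by decide) (by decide) (by decide) (by decide) (by simp [pvProfiles])

theorem pvGo_eq (s : List Char) (K : Nat) (hK : K ≠ 0) (l : List Int) :
    pvGoA s (pvPat (K : Int)) (K : Int) l = pvGoB s (K : Int) l := by
  induction l with
  | nil => rfl
  | cons i rest ih =>
      simp only [pvGoA, pvGoB]
      by_cases h : PySem.List.slice s (some i) (some (i + 7 * (K : Int))) ∈ pvPat (K : Int)
      · rw [if_pos h, if_pos (((pvChunkOk_iff K hK _).2 ((pvMemPat_iff K _).1 h))), ih]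
      · rw [if_neg h, if_neg (fun hc => h ((pvMemPat_iff K _).2 ((pvChunkOk_iff K hK _).1 hc)))]

theorem pvRange_neg (b s : Int) (hb : 0 ≤ b) (hs : s < 0) : PySem.List.pyRange 0 b s = [] := by
  simp only [PySem.List.pyRange]
  rw [if_neg (by omega), if_neg (by omega), if_neg (by omega)]
  simp

-- ===== VERDICT (by name: the statement is the Claim_ definition above) =====
theorem isrightarr_spec : Claim_equal_isrightarr := by
  intro current_arr k _ hk
  unfold Spec_isrightarr isrightarr isrightarr_alt
  rcases lt_trichotomy k 0 with hneg | h0 | hpos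
  · rw [pvRange_neg _ _ (by rw [PySem.Chars.len_eq]; positivity) (by omega)]; rfl
  · exact absurd h0 hk
  · have : k = ((k.toNat : Nat) : Int) := by omega
    rw [this]
    exact pvGo_eq _ k.toNat (by omega) _
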